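-- pv_equiv track=rewrite | github.com/sanghyunc7/algorithm-benchmark | combinations_of_a_number.py | combinations
-- ===== SOURCE A (Python) =====
-- def combinations(n):
--     letters = [c for c in str(n)]
--
--     # 123 -> 213, 132, 321, 312, 231
--     ans = set()
--     used = set() # indices in use
--     def helper(tmp):
--         if len(used) == len(letters):
--             ans.add(int("".join(tmp)))
--             return
--
--         for i in range(len(letters)):
--             if i in used or letters[i] == '0' and len(tmp) == 0:
--                 continue
--             used.add(i)
--             tmp.append(letters[i])
--             helper(tmp)
--             tmp.pop()
--             used.remove(i)
--
--     helper([])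
--     return list(ans)
-- ===== SOURCE B (Python) =====
-- def _picks(s):
--     # [(s[i], s with position i removed) for each i], by structural recursion
--     if not s:
--         return []
--     head, tail = s[0], s[1:]
--     return [(head, tail)] + [(c, head + rest) for (c, rest) in _picks(tail)]
--
--
-- def _perms(prefix, rest, out):
--     # append every string prefix + (permutation of rest) to out, smallest-index-first
--     if not rest:
--         out.append(prefix)
--         return out
--     for c, r in _picks(rest):
--         _perms(prefix + c, r, out)
--     return out
--
--
-- def combinations(n):
--     digits = str(n)
--     out = []
--     for c, r in _picks(digits):
--         if c != '0':
--             _perms(c, r, out)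
--     ans = set()
--     for p in out:
--         ans.add(int(p))
--     return list(ans)
-- ===== Notes on version B (the rewrite author's own statement) =====
-- stated objective: alternative
-- what changed: A's in-place backtracking DFS over a used-index set with a shared mutable tmp list is replaced by a pure pick-decomposition recursion (_picks pairs each character with the string minus that occurrence, _perms composes them) that materialises every digit string and then filters leading zeros and dedups in one final pass; the enumeration order is identical, so the set's insertion order (hence list(set) order) is preserved.
import Mathlib
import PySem

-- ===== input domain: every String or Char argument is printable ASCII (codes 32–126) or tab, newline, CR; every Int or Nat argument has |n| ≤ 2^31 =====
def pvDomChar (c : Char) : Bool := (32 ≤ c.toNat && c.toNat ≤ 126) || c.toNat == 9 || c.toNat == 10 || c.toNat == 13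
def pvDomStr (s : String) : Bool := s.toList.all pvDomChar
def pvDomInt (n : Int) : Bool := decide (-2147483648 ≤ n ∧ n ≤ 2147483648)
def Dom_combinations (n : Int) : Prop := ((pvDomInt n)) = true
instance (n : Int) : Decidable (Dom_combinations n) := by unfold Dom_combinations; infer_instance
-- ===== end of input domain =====

-- B replaces A's index-set backtracking DFS (shared mutable tmp/used state) by a pure
-- pick-decomposition recursion that builds every digit string and filters/dedups in one
-- final pass; same enumeration order, hence the same insertion order into the set.

-- ===== PORT A =====
-- helper(tmp) of A: the mutable closure state (used, tmp, ans) is threaded explicitly;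
-- fuel is only a totality guard (recursion depth is at most len(letters)+1, see pvHelperA_eq).
-- int("".join(tmp)) is PySem.Int.ofChars?; the .getD 0 never fires on Pre_ (digit strings).
def pvHelperA (letters : List Char) (fuel : Nat) (used : PySem.Set Int) (tmp : List Char)
    (ans : PySem.Set Int) : PySem.Set Int :=
  match fuel with
  | 0 => ans
  | fuel + 1 =>
    if PySem.Set.len used == (letters.length : Int) then
      PySem.Set.add ans ((PySem.Int.ofChars? tmp).getD 0)
    else
      (PySem.List.pyRange 0 (letters.length : Int) 1).foldl
        (fun a i =>
          if PySem.Set.contains used i || (PySem.List.pyGetD letters i ' ' == '0' && tmp.length == 0) then a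
          else pvHelperA letters fuel (PySem.Set.add used i)
                 (tmp ++ [PySem.List.pyGetD letters i ' ']) a)
        ans

def combinations (n : Int) : List Int :=
  let letters := PySem.Int.toChars n
  pvHelperA letters (letters.length + 1) PySem.Set.empty [] PySem.Set.empty

-- ===== PORT B =====
-- _picks(s): each character of s paired with s minus that occurrence
def pvPicks : List Char → List (Char × List Char)
  | [] => []
  | h :: t => (h, t) :: (pvPicks t).map (fun p => (p.1, h :: p.2))

-- termination fact for pvPerms (cited by its decreasing_by)
theorem pvPicks_snd_length : ∀ (s : List Char), ∀ p ∈ pvPicks s, p.2.length + 1 = s.length := by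
  intro s
  induction s with
  | nil => simp [pvPicks]
  | cons h t ih =>
    intro p hp
    simp only [pvPicks, List.mem_cons, List.mem_map] at hp
    rcases hp with rfl | ⟨q, hq, rfl⟩
    · simp
    · have := ih q hq
      simp only [List.length_cons]
      omega

-- _perms(prefix, rest, out): appends prefix + each permutation of rest to out
def pvPermsAcc (pre : List Char) (rest : List Char) (out : List (List Char)) : List (List Char) :=
  match rest with
  | [] => out ++ [pre]
  | h :: t =>
    (pvPicks (h :: t)).attach.foldl
      (fun out p => pvPermsAcc (pre ++ [p.1.1]) p.1.2 out) out
termination_by rest.length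
decreasing_by
  have := pvPicks_snd_length (h :: t) p.1 p.2
  simp only [List.length_cons] at this ⊢
  omega

def combinations_alt (n : Int) : List Int :=
  let digits := PySem.Int.toChars n
  let out := (pvPicks digits).foldl
    (fun out p => if p.1 != '0' then pvPermsAcc [p.1] p.2 out else out) []
  out.foldl (fun ans p => PySem.Set.add ans ((PySem.Int.ofChars? p).getD 0)) PySem.Set.empty

-- ===== PRECONDITION & SPEC =====
-- Pre_ excludes negative n: there str(n) contains '-', a permutation puts it in the middle
-- and int("".join(tmp)) raises ValueError in A.
def Pre_combinations (n : Int) : Prop := 0 ≤ n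
instance (n : Int) : Decidable (Pre_combinations n) := by unfold Pre_combinations; infer_instance
def pvWitness_combinations : Int := (120)

def Spec_combinations (n : Int) (out : List Int) : Prop := out = combinations_alt n
instance (n : Int) (out : List Int) : Decidable (Spec_combinations n out) := by unfold Spec_combinations; infer_instance

-- ===== CLAIM (what is proved, stated in full; the proofs are below) =====
def Claim_equal_combinations : Prop := ∀ (n : Int), Dom_combinations n → Pre_combinations n → Spec_combinations n (combinations n)

-- ===== LEMMAS AND PROOFS =====

-- the indices A's loop has not used yet, in increasing order
def pvFree (letters : List Char) (used : PySem.Set Int) : List Int :=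
  (PySem.List.pyRange 0 (letters.length : Int) 1).filter (fun i => !PySem.Set.contains used i)

theorem pvFree_nodup (letters : List Char) (used : PySem.Set Int) : (pvFree letters used).Nodup :=
  (PySem.List.nodup_pyRange_one 0 (letters.length : Int)).filter _

theorem pvFree_length (letters : List Char) (used : PySem.Set Int)
    (hN : used.Nodup)
    (hM : ∀ i ∈ used, i ∈ PySem.List.pyRange 0 (letters.length : Int) 1) :
    used.length + (pvFree letters used).length = letters.length := by
  have hperm : used.Perm ((PySem.List.pyRange 0 (letters.length : Int) 1).filter
      (fun j => PySem.Set.contains used j)) := by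
    rw [List.perm_ext_iff_of_nodup hN ((PySem.List.nodup_pyRange_one 0 (letters.length : Int)).filter _)]
    intro a
    simp only [List.mem_filter, PySem.Set.contains, List.contains_eq_mem, decide_eq_true_eq]
    exact ⟨fun h => ⟨hM a h, h⟩, fun h => h.2⟩
  have h1 := List.length_eq_length_filter_add (l := PySem.List.pyRange 0 (letters.length : Int) 1)
      (fun j => PySem.Set.contains used j)
  have h2 : (PySem.List.pyRange 0 (letters.length : Int) 1).length = letters.length := by
    simp [PySem.List.length_pyRange_one]
  rw [hperm.length_eq]
  unfold pvFree
  omega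

theorem pvFree_add (letters : List Char) (used : PySem.Set Int) (i : Int)
    (hi : PySem.Set.contains used i = false) :
    pvFree letters (PySem.Set.add used i) = (pvFree letters used).filter (fun j => !(j == i)) := by
  unfold pvFree
  rw [List.filter_filter]
  apply List.filter_congr
  intro j _
  have hmem : i ∉ used := by
    simpa [PySem.Set.contains, List.contains_eq_mem] using hi
  have hadd : PySem.Set.add used i = used ++ [i] := by
    simp [PySem.Set.add, PySem.Set.contains, List.contains_eq_mem, hmem]
  rw [hadd]
  simp only [PySem.Set.contains, List.contains_eq_mem, List.mem_append, List.mem_cons,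
    List.not_mem_nil, or_false, Bool.decide_or, Bool.not_or]
  cases hji : (j == i) <;> cases hju : (decide (j ∈ used)) <;>
    simp_all [beq_iff_eq]

theorem pvPicks_map_nodup (ch : Int → Char) :
    ∀ (xs : List Int), xs.Nodup →
      pvPicks (xs.map ch) = xs.map (fun i => (ch i, (xs.filter (fun j => !(j == i))).map ch)) := by
  intro xs
  induction xs with
  | nil => intro _; simp [pvPicks]
  | cons x t ih =>
    intro hN
    have hxt : x ∉ t := (List.nodup_cons.mp hN).1
    have hNt : t.Nodup := (List.nodup_cons.mp hN).2
    simp only [List.map_cons, pvPicks, ih hNt, List.map_map]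
    have hhead : (x :: t).filter (fun j => !(j == x)) = t := by
      rw [List.filter_cons_of_neg (by simp)]
      exact List.filter_eq_self.mpr (fun a ha => by
        have hax : a ≠ x := fun h => hxt (h ▸ ha)
        simp [hax])
    rw [hhead]
    congr 1
    refine List.map_congr_left (fun i hi => ?_)
    have hxi : (!(x == i)) = true := by
      have : x ≠ i := fun h => hxt (h ▸ hi)
      simp [this]
    simp only [Function.comp_apply]
    rw [show (List.filter (fun j => !(j == i)) (x :: t)) = x :: List.filter (fun j => !(j == i)) t from List.filter_cons_of_pos hxi, List.map_cons]


theorem pvFoldSkip {α β : Type} (l : List β) (p : β → Bool) (f : α → β → α) (a : α) :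
    l.foldl (fun acc x => if p x then acc else f acc x) a
      = (l.filter (fun x => !p x)).foldl f a := by
  rw [← PySem.List.foldl_if_eq_foldl_filter]
  exact PySem.List.foldl_congr_mem _ _ _ _ (fun acc x _ => by cases hp : p x <;> simp_all)

theorem pvFlatMapIf {α β : Type} (l : List α) (p : α → Bool) (G : α → List β) :
    l.flatMap (fun i => if p i then G i else []) = (l.filter p).flatMap G := by
  induction l with
  | nil => rfl
  | cons x t ih => cases hp : p x <;> simp [hp, ih]

theorem pvToChars_ne_nil (n : Int) : PySem.Int.toChars n ≠ [] := by
  have hd : ∀ m : Nat, Nat.toDigits 10 m ≠ [] := by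
    intro m
    show Nat.toDigitsCore 10 (m + 1) m [] ≠ []
    simp only [Nat.toDigitsCore]
    split
    · simp
    · intro h
      have := Nat.toDigitsCore_lens_eq 10 m (m / 10) (Nat.digitChar (m % 10)) []
      rw [h] at this
      simp at this
  unfold PySem.Int.toChars
  split
  · simp
  · exact hd n.toNat

-- the `out` parameter of _perms is a pure accumulator
theorem pvPermsAcc_append :
    ∀ (k : Nat) (rest : List Char), rest.length = k →
      ∀ (pre : List Char) (out : List (List Char)),
        pvPermsAcc pre rest out = out ++ pvPermsAcc pre rest [] := by
  intro k
  induction k with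
  | zero =>
    intro rest hk pre out
    rw [List.length_eq_zero_iff.mp hk, pvPermsAcc, pvPermsAcc]
    simp
  | succ k ih =>
    intro rest hk pre out
    cases rest with
    | nil => simp at hk
    | cons h t =>
      rw [pvPermsAcc, pvPermsAcc]
      have hbody : ∀ (o : List (List Char)) (p : {x // x ∈ pvPicks (h :: t)}),
          pvPermsAcc (pre ++ [p.1.1]) p.1.2 o = o ++ pvPermsAcc (pre ++ [p.1.1]) p.1.2 [] := by
        intro o p
        have hl := pvPicks_snd_length (h :: t) p.1 p.2
        exact ih p.1.2 (by simp only [List.length_cons] at hl hk; omega) _ o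
      rw [PySem.List.foldl_congr_mem _ _
            (fun o p => o ++ pvPermsAcc (pre ++ [p.1.1]) p.1.2 []) _
            (fun o p _ => hbody o p),
          PySem.List.foldl_congr_mem _ _
            (fun o p => o ++ pvPermsAcc (pre ++ [p.1.1]) p.1.2 []) _
            (fun o p _ => hbody o p),
          PySem.List.foldl_append_eq_flatMap, PySem.List.foldl_append_eq_flatMap]
      simp

-- one unfolding of _perms on a nonempty rest, accumulator pulled out
theorem pvPermsAcc_flatMap (rest : List Char) (hne : rest ≠ []) (pre : List Char) :
    pvPermsAcc pre rest [] = (pvPicks rest).flatMap (fun p => pvPermsAcc (pre ++ [p.1]) p.2 []) := by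
  cases rest with
  | nil => exact absurd rfl hne
  | cons h t =>
    rw [pvPermsAcc]
    rw [PySem.List.foldl_congr_mem _ _
          (fun o p => o ++ pvPermsAcc (pre ++ [p.1.1]) p.1.2 []) _
          (fun o p _ => pvPermsAcc_append p.1.2.length p.1.2 rfl _ o),
        PySem.List.foldl_append_eq_flatMap]
    simp only [List.nil_append, List.flatMap_subtype, List.unattach_attach]

theorem pvHelperA_eq (letters : List Char) :
    ∀ (fuel : Nat) (used : PySem.Set Int) (tmp : List Char) (ans : PySem.Set Int),
      used.Nodup →
      (∀ i ∈ used, i ∈ PySem.List.pyRange 0 (letters.length : Int) 1) →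
      tmp ≠ [] →
      (pvFree letters used).length < fuel →
      pvHelperA letters fuel used tmp ans =
        (pvPermsAcc tmp ((pvFree letters used).map (fun i => PySem.List.pyGetD letters i ' ')) []).foldl
          (fun a q => PySem.Set.add a ((PySem.Int.ofChars? q).getD 0)) ans := by
  intro fuel
  induction fuel with
  | zero => intro used tmp ans _ _ _ hfuel; omega
  | succ fuel ih =>
    intro used tmp ans hN hM htmp hfuel
    have hlen := pvFree_length letters used hN hM
    by_cases hfe : pvFree letters used = []
    · -- all indices used: A adds int(tmp); B appended exactly tmp
      have hb : (PySem.Set.len used == (letters.length : Int)) = true := by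
        have : used.length = letters.length := by
          rw [hfe] at hlen; simpa using hlen
        simp [PySem.Set.len, this]
      rw [pvHelperA, hb, if_pos rfl, hfe]
      rw [show (([] : List Int).map (fun i => PySem.List.pyGetD letters i ' ')) = [] from rfl,
        pvPermsAcc]
      simp
    · -- still free indices: one loop level on each side
      have hfl : (pvFree letters used).length ≠ 0 := fun h => hfe (List.length_eq_zero_iff.mp h)
      have hb : (PySem.Set.len used == (letters.length : Int)) = false := by
        simp only [PySem.Set.len, beq_eq_false_iff_ne, ne_eq, Int.natCast_inj]
        omega
      rw [pvHelperA, hb]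
      simp only [Bool.false_eq_true, if_false]
      have htl : (tmp.length == 0) = false := by
        simp [List.length_eq_zero_iff, htmp]
      simp only [htl, Bool.and_false, Bool.or_false]
      rw [pvFoldSkip]
      rw [pvPermsAcc_flatMap _ (by simp [hfe]) tmp,
        pvPicks_map_nodup _ _ (pvFree_nodup letters used),
        List.flatMap_map, List.foldl_flatMap]
      apply PySem.List.foldl_congr_mem'
      intro i hi a
      have hi' : i ∈ PySem.List.pyRange 0 (letters.length : Int) 1 ∧
          PySem.Set.contains used i = false := by
        have h := List.mem_filter.mp hi
        exact ⟨h.1, by simpa using h.2⟩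
      have hiu : i ∉ used := by
        simpa [PySem.Set.contains, List.contains_eq_mem] using hi'.2
      have hadd : PySem.Set.add used i = used ++ [i] := by
        simp [PySem.Set.add, PySem.Set.contains, List.contains_eq_mem, hiu]
      have hN' : (PySem.Set.add used i).Nodup := by
        rw [hadd]
        refine hN.append (List.nodup_singleton i) ?_
        intro x hx hx'
        simp only [List.mem_singleton] at hx'
        exact hiu (hx' ▸ hx)
      have hM' : ∀ j ∈ PySem.Set.add used i, j ∈ PySem.List.pyRange 0 (letters.length : Int) 1 := by
        rw [hadd]; intro j hj
        rcases List.mem_append.mp hj with h | h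
        · exact hM j h
        · simp only [List.mem_singleton] at h; exact h ▸ hi'.1
      have hfadd : pvFree letters (PySem.Set.add used i)
          = (pvFree letters used).filter (fun j => !(j == i)) := pvFree_add letters used i hi'.2
      have hipf : i ∈ pvFree letters used := hi
      have hfuel' : (pvFree letters (PySem.Set.add used i)).length < fuel := by
        have h1 : (pvFree letters used).filter (fun j => !(j == i))
            = (pvFree letters used).erase i := by
          rw [List.Nodup.erase_eq_filter (pvFree_nodup letters used)]
          apply List.filter_congr
          intro j _
          simp [bne]
        rw [hfadd, h1]
        have := List.length_erase_of_mem hipf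
        omega
      rw [ih _ _ a hN' hM' (by simp) hfuel', hfadd]

theorem pvMain (letters : List Char) (hne : letters ≠ []) :
    pvHelperA letters (letters.length + 1) PySem.Set.empty [] PySem.Set.empty =
      ((pvPicks letters).foldl
        (fun out p => if p.1 != '0' then pvPermsAcc [p.1] p.2 out else out) []).foldl
        (fun ans p => PySem.Set.add ans ((PySem.Int.ofChars? p).getD 0)) PySem.Set.empty := by
  cases letters with
  | nil => exact absurd rfl hne
  | cons c cs =>
    have hb : ((PySem.Set.len (PySem.Set.empty : PySem.Set Int)) == ((c :: cs).length : Int)) = false := by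
      simp only [PySem.Set.len, PySem.Set.empty, List.length_nil, List.length_cons,
        Nat.cast_zero, beq_eq_false_iff_ne, ne_eq]
      push_cast
      omega
    rw [pvHelperA, hb]
    simp only [Bool.false_eq_true, if_false]
    have hc0 : ∀ i : Int, PySem.Set.contains (PySem.Set.empty : PySem.Set Int) i = false := by
      intro i; simp [PySem.Set.contains, PySem.Set.empty]
    simp only [hc0, List.length_nil, Bool.false_or, beq_self_eq_true, Bool.and_true,
      List.nil_append]
    have hadd : ∀ i : Int, (PySem.Set.empty : PySem.Set Int).add i = [i] := by
      intro i; simp [PySem.Set.add, PySem.Set.contains, PySem.Set.empty]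
    simp only [hadd]
    rw [pvFoldSkip]
    -- A side: per surviving first index i, the whole subtree via pvHelperA_eq
    have hmap : (PySem.List.pyRange 0 (((c :: cs).length : Int)) 1).map
        (fun i => PySem.List.pyGetD (c :: cs) i ' ') = c :: cs :=
      PySem.List.map_pyGetD_pyRange_zero' (c :: cs) ' '
    have hstep : ∀ i ∈ (PySem.List.pyRange 0 (((c :: cs).length : Int)) 1).filter
          (fun x => !(PySem.List.pyGetD (c :: cs) x ' ' == '0')), ∀ a : PySem.Set Int,
        pvHelperA (c :: cs) (c :: cs).length [i] [PySem.List.pyGetD (c :: cs) i ' '] a =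
          (pvPermsAcc [PySem.List.pyGetD (c :: cs) i ' ']
            (((PySem.List.pyRange 0 (((c :: cs).length : Int)) 1).filter
              (fun j => !(j == i))).map (fun j => PySem.List.pyGetD (c :: cs) j ' ')) []).foldl
            (fun a q => PySem.Set.add a ((PySem.Int.ofChars? q).getD 0)) a := by
      intro i hi a
      have hi' := List.mem_filter.mp hi
      have hN1 : ([i] : List Int).Nodup := List.nodup_singleton i
      have hM1 : ∀ j ∈ ([i] : List Int), j ∈ PySem.List.pyRange 0 (((c :: cs).length : Int)) 1 := by
        intro j hj
        simp only [List.mem_singleton] at hj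
        exact hj ▸ hi'.1
      have hfree1 : pvFree (c :: cs) [i]
          = (PySem.List.pyRange 0 (((c :: cs).length : Int)) 1).filter (fun j => !(j == i)) := by
        unfold pvFree
        apply List.filter_congr
        intro j _
        simp only [PySem.Set.contains, List.contains_eq_mem, List.mem_singleton]
        cases h : (j == i) <;> simp_all [beq_iff_eq]
      have hflen : 1 + (pvFree (c :: cs) [i]).length = (c :: cs).length :=
        pvFree_length (c :: cs) [i] hN1 hM1
      rw [pvHelperA_eq (c :: cs) (c :: cs).length [i] [PySem.List.pyGetD (c :: cs) i ' '] a
        hN1 hM1 (by simp) (by omega), hfree1]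
    rw [PySem.List.foldl_congr_mem' _ _
        (fun a i => (pvPermsAcc [PySem.List.pyGetD (c :: cs) i ' ']
          (((PySem.List.pyRange 0 (((c :: cs).length : Int)) 1).filter
            (fun j => !(j == i))).map (fun j => PySem.List.pyGetD (c :: cs) j ' ')) []).foldl
          (fun a q => PySem.Set.add a ((PySem.Int.ofChars? q).getD 0)) a) _ hstep,
      ← List.foldl_flatMap]
    -- B side: picks of letters as picks over index range
    conv_rhs => rw [← hmap]
    rw [pvPicks_map_nodup _ _ (PySem.List.nodup_pyRange_one _ _), List.foldl_map]
    have hguard : ∀ (o : List (List Char)) (i : Int),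
        i ∈ PySem.List.pyRange 0 (((c :: cs).length : Int)) 1 →
        (if PySem.List.pyGetD (c :: cs) i ' ' != '0' then
            pvPermsAcc [PySem.List.pyGetD (c :: cs) i ' ']
              (((PySem.List.pyRange 0 (((c :: cs).length : Int)) 1).filter
                (fun j => !(j == i))).map (fun j => PySem.List.pyGetD (c :: cs) j ' ')) o
          else o)
        = o ++ (if !(PySem.List.pyGetD (c :: cs) i ' ' == '0') then
            pvPermsAcc [PySem.List.pyGetD (c :: cs) i ' ']
              (((PySem.List.pyRange 0 (((c :: cs).length : Int)) 1).filter
                (fun j => !(j == i))).map (fun j => PySem.List.pyGetD (c :: cs) j ' ')) []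
          else []) := by
      intro o i _
      simp only [bne]
      by_cases h : (PySem.List.pyGetD (c :: cs) i ' ' == '0') = true
      · simp [h]
      · simp only [Bool.not_eq_true] at h
        simp only [h, Bool.not_false, if_true]
        exact pvPermsAcc_append _ _ rfl _ o
    rw [PySem.List.foldl_congr_mem _ _ _ _ (fun o i hio => hguard o i hio)]
    rw [PySem.List.foldl_append_eq_flatMap]
    rw [List.nil_append]
    rw [pvFlatMapIf]

-- ===== VERDICT (by name: the statement is the Claim_ definition above) =====
theorem combinations_spec : Claim_equal_combinations := by
  intro n _ _
  unfold Spec_combinations combinations combinations_alt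
  exact pvMain (PySem.Int.toChars n) (pvToChars_ne_nil n)
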